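-- pv_equiv track=rewrite | github.com/qigang47/pm15minv2 | src/pm15min/research/automation/focus_feature_search.py | _allocate_family_targets
-- ===== SOURCE A (Python) =====
-- _FAMILY_ORDER = ("strike", "cycle", "volume", "price_vol", "context")
--
-- _FAMILY_LIMITS = {
--     "strike": (6, 10),
--     "cycle": (6, 10),
--     "volume": (6, 10),
--     "price_vol": (8, 12),
--     "context": (0, 4),
-- }
--
-- def _allocate_family_targets(width: int) -> dict[str, int]:
--     counts = {family: limits[0] for family, limits in _FAMILY_LIMITS.items()}
--     remaining = int(width) - sum(counts.values())
--     while remaining > 0: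
--         changed = False
--         for family in _FAMILY_ORDER:
--             if remaining <= 0:
--                 break
--             _, max_count = _FAMILY_LIMITS[family]
--             if counts[family] >= max_count:
--                 continue
--             counts[family] += 1
--             remaining -= 1
--             changed = True
--         if not changed:
--             break
--     return counts
-- ===== SOURCE B (Python) =====
-- _FAMILY_ORDER = ("strike", "cycle", "volume", "price_vol", "context")
--
-- _FAMILY_LIMITS = {
--     "strike": (6, 10),
--     "cycle": (6, 10),
--     "volume": (6, 10),
--     "price_vol": (8, 12),
--     "context": (0, 4),
-- }
--
-- def _allocate_family_targets(width: int) -> dict[str, int]: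
--     # Every family has equal slack 4 (total slack 20, total minimum 26), so the
--     # round-robin fill is uniform: q full rounds plus one extra for the first r families.
--     surplus = min(max(int(width) - 26, 0), 20)
--     q, r = divmod(surplus, 5)
--     return {family: _FAMILY_LIMITS[family][0] + q + (1 if i < r else 0)
--             for i, family in enumerate(_FAMILY_ORDER)}
-- ===== Notes on version B (the rewrite author's own statement) =====
-- stated objective: alternative
-- what changed: Replaces the round-robin while/for loop with a closed form: clamp the surplus over the minima to [0,20] and distribute it with divmod(surplus,5), exploiting that all five families have equal slack 4.
import Mathlib
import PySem

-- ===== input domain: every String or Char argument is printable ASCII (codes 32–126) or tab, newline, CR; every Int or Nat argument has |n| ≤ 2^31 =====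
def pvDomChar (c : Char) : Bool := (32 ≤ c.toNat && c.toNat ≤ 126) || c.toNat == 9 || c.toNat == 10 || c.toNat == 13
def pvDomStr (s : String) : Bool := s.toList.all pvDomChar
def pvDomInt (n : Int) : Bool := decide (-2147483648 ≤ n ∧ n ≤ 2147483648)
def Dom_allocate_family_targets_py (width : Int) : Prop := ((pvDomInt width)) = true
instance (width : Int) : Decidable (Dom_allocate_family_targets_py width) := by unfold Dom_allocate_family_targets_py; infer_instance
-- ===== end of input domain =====

-- B replaces A's round-robin while-loop by a closed form: the surplus over the minima is
-- clamped to [0,20] and distributed with divmod (all five families have equal slack 4).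

-- ===== PORT A =====
-- _FAMILY_ORDER
def pvOrderA : List String := ["strike", "cycle", "volume", "price_vol", "context"]
-- _FAMILY_LIMITS
def pvLimitsA : PySem.Dict String (Int × Int) :=
  PySem.Dict.ofList [("strike", (6, 10)), ("cycle", (6, 10)), ("volume", (6, 10)),
                     ("price_vol", (8, 12)), ("context", (0, 4))]
-- counts = {family: limits[0] for family, limits in _FAMILY_LIMITS.items()}
def pvInitA : PySem.Dict String Int :=
  pvLimitsA.items.foldl (fun d p => d.insert p.1 p.2.1) PySem.Dict.empty

-- one body of the inner 'for family in _FAMILY_ORDER' loop; state = (counts, remaining, changed, broke)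
def pvStepA (s : PySem.Dict String Int × Int × Bool × Bool) (f : String) :
    PySem.Dict String Int × Int × Bool × Bool :=
  let (c, r, ch, brk) := s
  if brk then (c, r, ch, brk)
  else if r ≤ 0 then (c, r, ch, true)                       -- break
  else
    let mx := (pvLimitsA.getD f (0, 0)).2
    if c.getD f 0 ≥ mx then (c, r, ch, brk)                 -- continue
    else (c.insert f (c.getD f 0 + 1), r - 1, true, brk)

-- one full pass of the inner for-loop, returning (counts, remaining, changed)
def pvPassA (c : PySem.Dict String Int) (r : Int) : PySem.Dict String Int × Int × Bool :=
  let s := pvOrderA.foldl pvStepA (c, r, false, false)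
  (s.1, s.2.1, s.2.2.1)

-- the 'while remaining > 0' loop; the fuel only bounds the recursion (each iteration that
-- continues strictly decreases remaining by at least 1, so remaining.toNat iterations suffice;
-- at fuel 0 the invariant gives remaining ≤ 0, i.e. the while-condition is already false)
def pvLoopAuxA : PySem.Dict String Int → Int → Nat → PySem.Dict String Int
  | c, _, 0 => c
  | c, r, n + 1 =>
    if r ≤ 0 then c
    else
      if (pvPassA c r).2.2 then pvLoopAuxA (pvPassA c r).1 (pvPassA c r).2.1 n
      else (pvPassA c r).1

def pvLoopA (c : PySem.Dict String Int) (r : Int) : PySem.Dict String Int :=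
  pvLoopAuxA c r r.toNat

def allocate_family_targets_py (width : Int) : List (String × Int) :=
  let counts := pvInitA
  let remaining := width - (counts.values.foldl (· + ·) 0)
  (pvLoopA counts remaining).items

-- ===== PORT B =====
def pvOrderB : List String := ["strike", "cycle", "volume", "price_vol", "context"]
def pvLimitsB : PySem.Dict String (Int × Int) :=
  PySem.Dict.ofList [("strike", (6, 10)), ("cycle", (6, 10)), ("volume", (6, 10)),
                     ("price_vol", (8, 12)), ("context", (0, 4))]

def allocate_family_targets_py_alt (width : Int) : List (String × Int) :=
  let surplus := min (max (width - 26) 0) 20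
  let q := PySem.Int.floordiv surplus 5
  let r := PySem.Int.mod surplus 5
  (PySem.List.enumerate pvOrderB).map
    (fun p => (p.2, (pvLimitsB.getD p.2 (0, 0)).1 + q + (if p.1 < r then 1 else 0)))

-- ===== PRECONDITION & SPEC =====
def Spec_allocate_family_targets_py (width : Int) (out : List (String × Int)) : Prop := out = allocate_family_targets_py_alt width
instance (width : Int) (out : List (String × Int)) : Decidable (Spec_allocate_family_targets_py width out) := by unfold Spec_allocate_family_targets_py; infer_instance

-- ===== CLAIM (what is proved, stated in full; the proofs are below) =====
def Claim_equal_allocate_family_targets_py : Prop := ∀ (width : Int), Dom_allocate_family_targets_py width → Spec_allocate_family_targets_py width (allocate_family_targets_py width)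

-- ===== LEMMAS AND PROOFS =====

-- the counts dict after k round-robin increments of every family
def pvC (k : Int) : PySem.Dict String Int :=
  PySem.Dict.ofList [("strike", 6 + k), ("cycle", 6 + k), ("volume", 6 + k),
                     ("price_vol", 8 + k), ("context", k)]

-- when remaining stays positive throughout a pass, its result depends on remaining only
-- through a constant offset (the break never fires)
theorem pvFold_shift (l : List String) (c : PySem.Dict String Int) (ch : Bool) (r r' : Int)
    (hr : (l.length : Int) ≤ r) (hr' : (l.length : Int) ≤ r') :
    ∃ d rr chf, l.foldl pvStepA (c, r, ch, false) = (d, rr, chf, false) ∧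
      l.foldl pvStepA (c, r', ch, false) = (d, rr + (r' - r), chf, false) := by
  induction l generalizing c ch r r' with
  | nil =>
    refine ⟨c, r, ch, rfl, ?_⟩
    rw [show r + (r' - r) = r' by ring, List.foldl_nil]
  | cons f t ih =>
    have hlen : ((f :: t).length : Int) = (t.length : Int) + 1 := by push_cast [List.length_cons]; ring
    have h0 : ¬ r ≤ 0 := by omega
    have h0' : ¬ r' ≤ 0 := by omega
    by_cases hcond : c.getD f 0 ≥ (pvLimitsA.getD f (0, 0)).2
    · have e1 : pvStepA (c, r, ch, false) f = (c, r, ch, false) := by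
        simp only [pvStepA]; rw [if_neg (by decide), if_neg h0, if_pos hcond]
      have e2 : pvStepA (c, r', ch, false) f = (c, r', ch, false) := by
        simp only [pvStepA]; rw [if_neg (by decide), if_neg h0', if_pos hcond]
      simp only [List.foldl, e1, e2]
      exact ih c ch r r' (by omega) (by omega)
    · have e1 : pvStepA (c, r, ch, false) f = (c.insert f (c.getD f 0 + 1), r - 1, true, false) := by
        simp only [pvStepA]; rw [if_neg (by decide), if_neg h0, if_neg hcond]
      have e2 : pvStepA (c, r', ch, false) f = (c.insert f (c.getD f 0 + 1), r' - 1, true, false) := by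
        simp only [pvStepA]; rw [if_neg (by decide), if_neg h0', if_neg hcond]
      simp only [List.foldl, e1, e2]
      obtain ⟨d, rr, chf, H1, H2⟩ :=
        ih (c.insert f (c.getD f 0 + 1)) true (r - 1) (r' - 1) (by omega) (by omega)
      exact ⟨d, rr, chf, H1, by rw [H2, show rr + (r' - 1 - (r - 1)) = rr + (r' - r) by ring]⟩

-- a pass verified at remaining = 5 transfers to any remaining ≥ 5
theorem pvPass_of_ground (c c' : PySem.Dict String Int)
    (hg : pvOrderA.foldl pvStepA (c, 5, false, false) = (c', 0, true, false))
    (r : Int) (hr : 5 ≤ r) : pvPassA c r = (c', r - 5, true) := by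
  obtain ⟨d, rr, chf, H1, H2⟩ :=
    pvFold_shift pvOrderA c false 5 r (by norm_num [pvOrderA]) (by norm_num [pvOrderA]; omega)
  rw [hg] at H1
  simp only [Prod.mk.injEq] at H1
  obtain ⟨hd, hrr, hchf, -⟩ := H1
  simp only [pvPassA]
  rw [H2, ← hd, ← hrr, ← hchf]
  norm_num

-- a pass over the saturated dict changes nothing
theorem pvPass_full (r : Int) (hr : 0 < r) : pvPassA (pvC 4) r = (pvC 4, r, false) := by
  have hstep : ∀ f, (pvC 4).getD f 0 ≥ (pvLimitsA.getD f (0, 0)).2 →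
      pvStepA (pvC 4, r, false, false) f = (pvC 4, r, false, false) := by
    intro f hf
    simp only [pvStepA]
    rw [if_neg (by decide), if_neg (by omega), if_pos hf]
  simp only [pvPassA, pvOrderA, List.foldl]
  rw [hstep _ (by decide), hstep _ (by decide), hstep _ (by decide), hstep _ (by decide),
      hstep _ (by decide)]

theorem pvLoop_big (r : Int) (hr : 20 < r) : pvLoopA (pvC 0) r = pvC 4 := by
  have u2 : ∀ (c c' : PySem.Dict String Int) (r' rr : Int) (n : Nat), ¬ r' ≤ 0 →
      pvPassA c r' = (c', rr, true) → pvLoopAuxA c r' (n + 1) = pvLoopAuxA c' rr n := by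
    intro c c' r' rr n h hp
    simp only [pvLoopAuxA]
    rw [if_neg h, hp]
    simp
  have u3 : ∀ (c c' : PySem.Dict String Int) (r' rr : Int) (n : Nat), ¬ r' ≤ 0 →
      pvPassA c r' = (c', rr, false) → pvLoopAuxA c r' (n + 1) = c' := by
    intro c c' r' rr n h hp
    simp only [pvLoopAuxA]
    rw [if_neg h, hp]
    simp
  unfold pvLoopA
  obtain ⟨m, hm⟩ : ∃ m, r.toNat = m + 5 := ⟨r.toNat - 5, by omega⟩
  rw [hm, show m + 5 = (m + 4) + 1 by omega]
  rw [u2 _ _ _ _ _ (by omega) (pvPass_of_ground (pvC 0) (pvC 1) (by decide) r (by omega))]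
  rw [show m + 4 = (m + 3) + 1 by omega]
  rw [u2 _ _ _ _ _ (by omega) (pvPass_of_ground (pvC 1) (pvC 2) (by decide) (r - 5) (by omega))]
  rw [show m + 3 = (m + 2) + 1 by omega]
  rw [u2 _ _ _ _ _ (by omega) (pvPass_of_ground (pvC 2) (pvC 3) (by decide) (r - 5 - 5) (by omega))]
  rw [show m + 2 = (m + 1) + 1 by omega]
  rw [u2 _ _ _ _ _ (by omega) (pvPass_of_ground (pvC 3) (pvC 4) (by decide) (r - 5 - 5 - 5) (by omega))]
  rw [u3 _ _ _ _ _ (by omega) (pvPass_full (r - 5 - 5 - 5 - 5) (by omega))]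

-- ===== VERDICT (by name: the statement is the Claim_ definition above) =====
theorem allocate_family_targets_py_spec : Claim_equal_allocate_family_targets_py := by
  intro w _
  unfold Spec_allocate_family_targets_py allocate_family_targets_py
  have hsum : pvInitA.values.foldl (· + ·) 0 = 26 := by decide
  simp only [hsum]
  by_cases h1 : w - 26 ≤ 0
  · unfold pvLoopA
    rw [show (w - 26).toNat = 0 by omega]
    simp only [pvLoopAuxA]
    unfold allocate_family_targets_py_alt
    rw [show min (max (w - 26) 0) 20 = 0 by omega]
    decide
  · by_cases h2 : w - 26 ≤ 20
    · obtain ⟨k, hk1, hk2, hk3⟩ : ∃ k : Nat, 1 ≤ k ∧ k ≤ 20 ∧ w = 26 + (k : Int) :=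
        ⟨(w - 26).toNat, by omega, by omega, by omega⟩
      subst hk3
      interval_cases k <;> decide
    · rw [show pvInitA = pvC 0 by decide]
      rw [pvLoop_big _ (by omega)]
      unfold allocate_family_targets_py_alt
      rw [show min (max (w - 26) 0) 20 = 20 by omega]
      decide
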